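-- pv_equiv track=rewrite | github.com/marlonp97/ST0245-033 | laboratorios/lab01/ejercicioEnLinea/Laboratorio01 - Punto2.py | splitOdd10Aux
-- ===== SOURCE A (Python) =====
-- def splitOdd10Aux(start, nums, mult, imp):
--   if (start >= len(nums)):
--     return (mult%10 == 0) and (imp%2 == 1)
--   elif (splitOdd10Aux(start+1, nums, mult+nums[start], imp)):
--     return True
--   elif (splitOdd10Aux(start+1, nums, mult, imp+nums[start])):
--     return True
--   else:
--     return False
-- ===== SOURCE B (Python) =====
-- def splitOdd10Aux(start, nums, mult, imp):
--     # DP over the set of reachable (mult % 10, imp % 2) residue states.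
--     states = {(mult % 10, imp % 2)}
--     for i in range(start, len(nums)):
--         v = nums[i]
--         nxt = set()
--         for (m, p) in states:
--             nxt.add(((m + v) % 10, p))
--             nxt.add((m, (p + v) % 2))
--         states = nxt
--     return (0, 1) in states
-- ===== Notes on version B (the rewrite author's own statement) =====
-- stated objective: alternative
-- what changed: Replaced the branching include/exclude recursion over all 2^n splits by an iterative DP that maintains the set of reachable (mult % 10, imp % 2) residue pairs (at most 20 states); on random inputs A's short-circuit usually exits early, so no speed-up was measured.
import Mathlib
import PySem

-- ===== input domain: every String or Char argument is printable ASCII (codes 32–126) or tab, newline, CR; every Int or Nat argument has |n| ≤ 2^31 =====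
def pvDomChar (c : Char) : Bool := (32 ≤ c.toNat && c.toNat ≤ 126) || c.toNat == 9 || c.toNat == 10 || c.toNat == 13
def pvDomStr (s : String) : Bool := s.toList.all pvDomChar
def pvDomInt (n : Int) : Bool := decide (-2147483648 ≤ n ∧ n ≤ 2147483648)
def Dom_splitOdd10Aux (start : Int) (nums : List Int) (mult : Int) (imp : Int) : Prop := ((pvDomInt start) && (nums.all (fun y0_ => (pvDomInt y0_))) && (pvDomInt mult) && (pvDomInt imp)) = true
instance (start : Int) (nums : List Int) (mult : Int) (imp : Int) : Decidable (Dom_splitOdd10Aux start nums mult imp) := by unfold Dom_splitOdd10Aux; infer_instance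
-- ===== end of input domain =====

-- B replaces A's include/exclude recursion by a DP over the set of reachable (mult % 10, imp % 2) residue states (alternative algorithm; return value proved equal on Pre_).


-- ===== PORT A =====
-- A's recursion on the Int index 'start', made structural by the fuel
-- ((len - start).toNat): fuel = 0 exactly when 'start >= len(nums)' (the
-- Python base case), fuel only makes the same computation total.
def splitOdd10AuxGo (fuel : Nat) (start : Int) (nums : List Int) (mult : Int) (imp : Int) : Bool :=
  match fuel with
  | 0 =>
    -- start >= len(nums)
    (PySem.Int.mod mult 10 == 0) && (PySem.Int.mod imp 2 == 1)
  | fuel + 1 =>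
    -- nums[start] (Python index, possibly negative): total under Pre_ (start ≥ -len)
    let v := PySem.List.pyGetD nums start 0
    if splitOdd10AuxGo fuel (start + 1) nums (mult + v) imp then true
    else if splitOdd10AuxGo fuel (start + 1) nums mult (imp + v) then true
    else false

def splitOdd10Aux (start : Int) (nums : List Int) (mult : Int) (imp : Int) : Bool :=
  splitOdd10AuxGo ((nums.length : Int) - start).toNat start nums mult imp

-- ===== PORT B =====
def splitOdd10Aux_alt (start : Int) (nums : List Int) (mult : Int) (imp : Int) : Bool :=
  let init : PySem.Set (Int × Int) :=
    PySem.Set.add PySem.Set.empty (PySem.Int.mod mult 10, PySem.Int.mod imp 2)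
  let final :=
    (PySem.List.pyRange start (nums.length : Int) 1).foldl
      (fun states i =>
        let v := PySem.List.pyGetD nums i 0
        states.foldl
          (fun nxt mp =>
            PySem.Set.add
              (PySem.Set.add nxt (PySem.Int.mod (mp.1 + v) 10, mp.2))
              (mp.1, PySem.Int.mod (mp.2 + v) 2))
          PySem.Set.empty)
      init
  PySem.Set.contains final ((0 : Int), (1 : Int))

-- ===== PRECONDITION & SPEC =====
-- Pre_ excludes exactly the inputs where Python A raises IndexError: start below -len(nums).
def Pre_splitOdd10Aux (start : Int) (nums : List Int) (mult : Int) (imp : Int) : Prop :=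
  -(nums.length : Int) ≤ start
instance (start : Int) (nums : List Int) (mult : Int) (imp : Int) : Decidable (Pre_splitOdd10Aux start nums mult imp) := by unfold Pre_splitOdd10Aux; infer_instance
def pvWitness_splitOdd10Aux : Int × List Int × Int × Int := (0, [3, 7, 10], 0, 0)

def Spec_splitOdd10Aux (start : Int) (nums : List Int) (mult : Int) (imp : Int) (out : Bool) : Prop := out = splitOdd10Aux_alt start nums mult imp
instance (start : Int) (nums : List Int) (mult : Int) (imp : Int) (out : Bool) : Decidable (Spec_splitOdd10Aux start nums mult imp out) := by unfold Spec_splitOdd10Aux; infer_instance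

-- ===== CLAIM (what is proved, stated in full; the proofs are below) =====
def Claim_equal_splitOdd10Aux : Prop := ∀ (start : Int) (nums : List Int) (mult : Int) (imp : Int), Dom_splitOdd10Aux start nums mult imp → Pre_splitOdd10Aux start nums mult imp → Spec_splitOdd10Aux start nums mult imp (splitOdd10Aux start nums mult imp)

-- ===== LEMMAS AND PROOFS =====

-- A's recursion, abstracted over the list of values it visits (nums[start], …, nums[len-1]).
def pvRec (vs : List Int) (m p : Int) : Bool :=
  match vs with
  | [] => (PySem.Int.mod m 10 == 0) && (PySem.Int.mod p 2 == 1)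
  | v :: t => pvRec t (m + v) p || pvRec t m (p + v)

-- B's recursion on residues.
def pvRecR (vs : List Int) (m p : Int) : Bool :=
  match vs with
  | [] => (m == 0) && (p == 1)
  | v :: t => pvRecR t (PySem.Int.mod (m + v) 10) p || pvRecR t m (PySem.Int.mod (p + v) 2)

def pvStep (v : Int) (S : PySem.Set (Int × Int)) : PySem.Set (Int × Int) :=
  S.foldl
    (fun nxt mp =>
      PySem.Set.add
        (PySem.Set.add nxt (PySem.Int.mod (mp.1 + v) 10, mp.2))
        (mp.1, PySem.Int.mod (mp.2 + v) 2))
    PySem.Set.empty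

lemma pvRec_eq_recR (vs : List Int) : ∀ m p : Int,
    pvRec vs m p = pvRecR vs (PySem.Int.mod m 10) (PySem.Int.mod p 2) := by
  induction vs with
  | nil =>
    intro m p
    simp [pvRec, pvRecR]
  | cons v t ih =>
    intro m p
    have h10 : PySem.Int.mod (PySem.Int.mod m 10 + v) 10 = PySem.Int.mod (m + v) 10 := by
      simp only [PySem.Int.mod_eq_emod_of_pos (by omega : (0:Int) < 10)]; omega
    have h2 : PySem.Int.mod (PySem.Int.mod p 2 + v) 2 = PySem.Int.mod (p + v) 2 := by
      simp only [PySem.Int.mod_eq_emod_of_pos (by omega : (0:Int) < 2)]; omega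
    simp only [pvRec, pvRecR, ih, h10, h2]

-- membership in one DP step
lemma pv_mem_step (v : Int) (S : PySem.Set (Int × Int)) (x : Int × Int) :
    x ∈ pvStep v S ↔ ∃ q ∈ S, x = (PySem.Int.mod (q.1 + v) 10, q.2) ∨ x = (q.1, PySem.Int.mod (q.2 + v) 2) := by
  unfold pvStep
  have gen : ∀ (l : List (Int × Int)) (acc : PySem.Set (Int × Int)),
      (x ∈ l.foldl
        (fun nxt mp =>
          PySem.Set.add (PySem.Set.add nxt (PySem.Int.mod (mp.1 + v) 10, mp.2))
            (mp.1, PySem.Int.mod (mp.2 + v) 2)) acc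
        ↔ x ∈ acc ∨ ∃ q ∈ l, x = (PySem.Int.mod (q.1 + v) 10, q.2) ∨ x = (q.1, PySem.Int.mod (q.2 + v) 2)) := by
    intro l
    induction l with
    | nil => intro acc; simp
    | cons q t ih =>
      intro acc
      simp only [List.foldl_cons, ih, PySem.Set.mem_add, List.mem_cons]
      constructor
      · rintro (((h | h) | h) | ⟨q', hq', h⟩)
        · exact Or.inl h
        · exact Or.inr ⟨q, Or.inl rfl, Or.inl h⟩
        · exact Or.inr ⟨q, Or.inl rfl, Or.inr h⟩
        · exact Or.inr ⟨q', Or.inr hq', h⟩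
      · rintro (h | ⟨q', hq' | hq', h⟩)
        · exact Or.inl (Or.inl (Or.inl h))
        · subst hq'
          rcases h with h | h
          · exact Or.inl (Or.inl (Or.inr h))
          · exact Or.inl (Or.inr h)
        · exact Or.inr ⟨q', hq', h⟩
  rw [gen]
  simp [PySem.Set.empty]

-- the DP fold reaches (0,1) iff some initial state can finish via pvRecR
lemma pv_fold_mem (vs : List Int) : ∀ (S : PySem.Set (Int × Int)),
    (((0 : Int), (1 : Int)) ∈ vs.foldl (fun states v => pvStep v states) S
      ↔ ∃ q ∈ S, pvRecR vs q.1 q.2 = true) := by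
  induction vs with
  | nil =>
    intro S
    constructor
    · intro h; exact ⟨(0, 1), h, by simp [pvRecR]⟩
    · rintro ⟨⟨m, p⟩, hq, h⟩
      simp only [pvRecR, Bool.and_eq_true, beq_iff_eq] at h
      obtain ⟨h1, h2⟩ := h
      subst h1; subst h2; exact hq
  | cons v t ih =>
    intro S
    simp only [List.foldl_cons, ih]
    constructor
    · rintro ⟨q, hq, h⟩
      rw [pv_mem_step] at hq
      obtain ⟨q', hq', hcase⟩ := hq
      refine ⟨q', hq', ?_⟩
      simp only [pvRecR]
      simp only [Bool.or_eq_true]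
      rcases hcase with h1 | h1
      · subst h1; exact Or.inl h
      · subst h1; exact Or.inr h
    · rintro ⟨q, hq, h⟩
      simp only [pvRecR, Bool.or_eq_true] at h
      rcases h with h | h
      · exact ⟨(PySem.Int.mod (q.1 + v) 10, q.2), (pv_mem_step v S _).mpr ⟨q, hq, Or.inl rfl⟩, h⟩
      · exact ⟨(q.1, PySem.Int.mod (q.2 + v) 2), (pv_mem_step v S _).mpr ⟨q, hq, Or.inr rfl⟩, h⟩

-- A's port equals pvRec over the visited-value list.
lemma pvGo_eq_rec (fuel : Nat) : ∀ (start : Int) (nums : List Int) (mult imp : Int),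
    fuel = ((nums.length : Int) - start).toNat →
    splitOdd10AuxGo fuel start nums mult imp
      = pvRec ((PySem.List.pyRange start (nums.length : Int) 1).map
          (fun i => PySem.List.pyGetD nums i 0)) mult imp := by
  induction fuel with
  | zero =>
    intro start nums mult imp hf
    have h : (nums.length : Int) ≤ start := by omega
    rw [PySem.List.pyRange_one_eq_nil h]
    simp [splitOdd10AuxGo, pvRec]
  | succ n ih =>
    intro start nums mult imp hf
    have h' : start < (nums.length : Int) := by omega
    have hn : n = ((nums.length : Int) - (start + 1)).toNat := by omega
    rw [PySem.List.pyRange_one_cons h']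
    simp only [List.map_cons, pvRec, splitOdd10AuxGo]
    rw [ih (start + 1) nums (mult + PySem.List.pyGetD nums start 0) imp hn,
        ih (start + 1) nums mult (imp + PySem.List.pyGetD nums start 0) hn]
    cases pvRec ((PySem.List.pyRange (start + 1) (nums.length : Int) 1).map
        (fun i => PySem.List.pyGetD nums i 0)) (mult + PySem.List.pyGetD nums start 0) imp <;> simp

lemma pvA_eq_rec (start : Int) (nums : List Int) (mult imp : Int) :
    splitOdd10Aux start nums mult imp
      = pvRec ((PySem.List.pyRange start (nums.length : Int) 1).map
          (fun i => PySem.List.pyGetD nums i 0)) mult imp :=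
  pvGo_eq_rec _ start nums mult imp rfl

-- ===== VERDICT (by name: the statement is the Claim_ definition above) =====
theorem splitOdd10Aux_spec : Claim_equal_splitOdd10Aux := by
  intro start nums mult imp _ _
  unfold Spec_splitOdd10Aux
  rw [pvA_eq_rec]
  unfold splitOdd10Aux_alt
  set vs := (PySem.List.pyRange start (nums.length : Int) 1).map
      (fun i => PySem.List.pyGetD nums i 0) with hvs
  have hfold : (PySem.List.pyRange start (nums.length : Int) 1).foldl
      (fun states i => pvStep (PySem.List.pyGetD nums i 0) states)
      (PySem.Set.add PySem.Set.empty (PySem.Int.mod mult 10, PySem.Int.mod imp 2))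
      = vs.foldl (fun states v => pvStep v states)
          (PySem.Set.add PySem.Set.empty (PySem.Int.mod mult 10, PySem.Int.mod imp 2)) := by
    rw [hvs, List.foldl_map]
  simp only [pvStep] at hfold
  simp only []
  rw [hfold]
  rw [pvRec_eq_recR]
  have hmem := pv_fold_mem vs
      (PySem.Set.add PySem.Set.empty (PySem.Int.mod mult 10, PySem.Int.mod imp 2))
  by_cases hr : pvRecR vs (PySem.Int.mod mult 10) (PySem.Int.mod imp 2) = true
  · rw [hr]
    have : (((0:Int), (1:Int)) ∈ vs.foldl (fun states v => pvStep v states)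
        (PySem.Set.add PySem.Set.empty (PySem.Int.mod mult 10, PySem.Int.mod imp 2))) := by
      exact hmem.mpr ⟨(PySem.Int.mod mult 10, PySem.Int.mod imp 2),
        by rw [PySem.Set.mem_add]; exact Or.inr rfl, hr⟩
    exact ((PySem.Set.contains_iff _ _).mpr this).symm
  · rw [Bool.not_eq_true] at hr
    rw [hr]
    symm
    rw [Bool.eq_false_iff]
    intro hc
    have hm := (PySem.Set.contains_iff _ _).mp hc
    obtain ⟨q, hq, hqr⟩ := hmem.mp hm
    rcases (PySem.Set.mem_add _ _ _).mp hq with h0 | hq0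
    · exact absurd h0 (by simp [PySem.Set.empty])
    · subst hq0
      have hq' : pvRecR vs (PySem.Int.mod mult 10) (PySem.Int.mod imp 2) = true := hqr
      rw [hq'] at hr
      exact Bool.true_eq_false.mp hr
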